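-- pv_equiv track=rewrite | github.com/yigitv4rli/CENG111 | Perfect_Numbers.py | perfect_numbers
-- ===== SOURCE A (Python) =====
-- def summation(N):
--     total = 0
--     for i in range(1,N):
--         if N%i == 0:
--             total += i
--     return total
--
-- def perfect_numbers(N):
--     div = [],[],[]
--     for i in range(1,N):
--         if summation(i) == i:
--             div[0].append(i)
--         elif summation(i) > i:
--             div[1].append(i)
--         elif summation(i) < i:
--             div[2].append(i)
--     return div
-- ===== SOURCE B (Python) =====
-- def perfect_numbers(N):
--     n = N if N > 1 else 1
--     s = [0] * n
--     for d in range(1, n):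
--         for m in range(2 * d, n, d):
--             s[m] += d
--     perfect, abundant, deficient = [], [], []
--     for i in range(1, n):
--         t = s[i]
--         if t == i:
--             perfect.append(i)
--         elif t > i:
--             abundant.append(i)
--         else:
--             deficient.append(i)
--     return perfect, abundant, deficient
-- ===== Notes on version B (the rewrite author's own statement) =====
-- stated objective: faster
-- what changed: Replaced the per-number trial-division divisor sum (recomputed up to three times per number) with a single divisor-sum sieve that adds each d to all its multiples, followed by one classification pass.
import Mathlib
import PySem

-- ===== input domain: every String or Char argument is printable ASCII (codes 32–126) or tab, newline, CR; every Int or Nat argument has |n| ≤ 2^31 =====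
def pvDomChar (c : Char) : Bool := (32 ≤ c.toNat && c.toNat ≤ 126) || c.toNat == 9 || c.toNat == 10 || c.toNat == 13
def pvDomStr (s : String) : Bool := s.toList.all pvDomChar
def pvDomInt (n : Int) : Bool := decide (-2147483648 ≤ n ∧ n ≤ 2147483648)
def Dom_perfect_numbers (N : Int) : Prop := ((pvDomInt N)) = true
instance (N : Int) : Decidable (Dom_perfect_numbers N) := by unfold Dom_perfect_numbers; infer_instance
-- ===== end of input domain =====

-- B replaces A's per-number trial-division divisor sums (recomputed up to three times
-- per number) with one divisor-sum sieve plus a single classification pass (faster,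
-- measured).


-- ===== PORT A =====
def summation (N : Int) : Int :=
  (PySem.List.pyRange 1 N 1).foldl
    (fun total i => if PySem.Int.mod N i = 0 then total + i else total) 0

def perfect_numbers (N : Int) : List Int × List Int × List Int :=
  (PySem.List.pyRange 1 N 1).foldl
    (fun div i =>
      if summation i = i then (div.1 ++ [i], div.2.1, div.2.2)
      else if summation i > i then (div.1, div.2.1 ++ [i], div.2.2)
      else if summation i < i then (div.1, div.2.1, div.2.2 ++ [i])
      else div)
    ([], [], [])

-- ===== PORT B =====
-- the two sieve loops of Source B: s = [0]*n; for d in range(1,n): for m in range(2*d,n,d): s[m] += d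
def pnSieve (n : Int) : List Int :=
  (PySem.List.pyRange 1 n 1).foldl
    (fun s d =>
      (PySem.List.pyRange (2*d) n d).foldl
        (fun s m => PySem.List.pySetD s m (PySem.List.pyGetD s m 0 + d)) s)
    (List.replicate n.toNat 0)

def perfect_numbers_alt (N : Int) : List Int × List Int × List Int :=
  let n := if N > 1 then N else 1
  let s := pnSieve n
  (PySem.List.pyRange 1 n 1).foldl
    (fun acc i =>
      let t := PySem.List.pyGetD s i 0
      if t = i then (acc.1 ++ [i], acc.2.1, acc.2.2)
      else if t > i then (acc.1, acc.2.1 ++ [i], acc.2.2)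
      else (acc.1, acc.2.1, acc.2.2 ++ [i]))
    ([], [], [])

-- ===== PRECONDITION & SPEC =====
def Spec_perfect_numbers (N : Int) (out : List Int × List Int × List Int) : Prop := out = perfect_numbers_alt N
instance (N : Int) (out : List Int × List Int × List Int) : Decidable (Spec_perfect_numbers N out) := by unfold Spec_perfect_numbers; infer_instance

-- ===== CLAIM (what is proved, stated in full; the proofs are below) =====
def Claim_equal_perfect_numbers : Prop := ∀ (N : Int), Dom_perfect_numbers N → Spec_perfect_numbers N (perfect_numbers N)

-- ===== LEMMAS AND PROOFS =====

-- one in-bounds update read back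
lemma pn_get_upd (s : List Int) (m j v : Int) (hm0 : 0 ≤ m) (hm : m < (s.length : Int))
    (hj0 : 0 ≤ j) :
    PySem.List.pyGetD (PySem.List.pySetD s m v) j 0
      = if j = m then v else PySem.List.pyGetD s j 0 := by
  have hm' : m.toNat < s.length := by omega
  have e1 : (m.toNat : Int) = m := Int.toNat_of_nonneg hm0
  have e2 : (j.toNat : Int) = j := Int.toNat_of_nonneg hj0
  rw [← e1, ← e2, PySem.List.pyGetD_pySetD_natCast s m.toNat j.toNat v 0 hm']
  by_cases h : j = m
  · rw [if_pos (by omega), if_pos (by omega)]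
  · rw [if_neg (by omega), if_neg (by omega)]

-- the inner loop preserves the length
lemma pn_foldl_upd_length (d : Int) (L : List Int) (s : List Int) :
    (L.foldl (fun s m => PySem.List.pySetD s m (PySem.List.pyGetD s m 0 + d)) s).length
      = s.length := by
  induction L generalizing s with
  | nil => rfl
  | cons m L ih => rw [List.foldl_cons, ih, PySem.List.length_pySetD]

-- reading cell j after the inner loop: the old value plus d for each occurrence of j
lemma pn_get_foldl_upd (d : Int) (L : List Int) (s : List Int)
    (hL : ∀ m ∈ L, 0 ≤ m ∧ m < (s.length : Int)) (j : Int) (hj0 : 0 ≤ j) :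
    PySem.List.pyGetD (L.foldl (fun s m => PySem.List.pySetD s m (PySem.List.pyGetD s m 0 + d)) s) j 0
      = PySem.List.pyGetD s j 0 + d * (L.count j) := by
  induction L generalizing s with
  | nil => simp
  | cons m L ih =>
    have hm := hL m (List.mem_cons_self)
    rw [List.foldl_cons]
    rw [ih _ (by
      intro x hx
      have := hL x (List.mem_cons_of_mem _ hx)
      rwa [PySem.List.length_pySetD])]
    rw [pn_get_upd s m j _ hm.1 hm.2 hj0]
    by_cases h : j = m
    · subst h
      rw [if_pos rfl]
      simp
      ring
    · rw [if_neg h]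
      have : ¬ (m = j) := fun hh => h hh.symm
      simp [this]

-- range(2*d, n, d) has no duplicates (d > 0)
lemma pn_nodup_range (a n d : Int) (hd : 0 < d) : (PySem.List.pyRange a n d).Nodup := by
  rw [PySem.List.pyRange_of_pos a n hd]
  refine List.Nodup.map ?_ (List.nodup_range)
  intro x y hxy
  have h : d * (x : Int) = d * (y : Int) := by linarith [hxy]
  have := mul_left_cancel₀ (ne_of_gt hd) h
  exact_mod_cast this

-- membership in range(2*d, n, d) is "proper-divisor of j below n" (d ≥ 1, j ≥ 0)
lemma pn_mem_range (n d j : Int) (hd : 1 ≤ d) :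
    j ∈ PySem.List.pyRange (2*d) n d ↔ d ∣ j ∧ 2*d ≤ j ∧ j < n := by
  rw [PySem.List.mem_pyRange_iff_of_pos (by omega)]
  constructor
  · rintro ⟨h1, h2, k, hk⟩
    exact ⟨⟨k + 2, by linarith [hk]⟩, h1, h2⟩
  · rintro ⟨⟨k, hk⟩, h1, h2⟩
    exact ⟨h1, h2, ⟨k - 2, by rw [hk]; ring⟩⟩

-- the whole sieve, one outer step at a time
lemma pn_sieve_fold (n : Int) (D : List Int) (hD : ∀ d ∈ D, 1 ≤ d) (s : List Int)
    (hs : (s.length : Int) = n) (j : Int) (hj0 : 0 ≤ j) :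
    PySem.List.pyGetD
      (D.foldl (fun s d =>
        (PySem.List.pyRange (2*d) n d).foldl
          (fun s m => PySem.List.pySetD s m (PySem.List.pyGetD s m 0 + d)) s) s) j 0
      = PySem.List.pyGetD s j 0
        + (D.map (fun d => if d ∣ j ∧ 2*d ≤ j ∧ j < n then d else 0)).sum := by
  induction D generalizing s with
  | nil => simp
  | cons d D ih =>
    have hd := hD d (List.mem_cons_self)
    rw [List.foldl_cons]
    have hb : ∀ m ∈ PySem.List.pyRange (2*d) n d, 0 ≤ m ∧ m < (s.length : Int) := by
      intro m hm
      rw [pn_mem_range n d m hd] at hm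
      exact ⟨by omega, by omega⟩
    rw [ih (fun x hx => hD x (List.mem_cons_of_mem _ hx)) _
      (by rw [pn_foldl_upd_length]; exact hs)]
    rw [pn_get_foldl_upd d _ s hb j hj0]
    have hcount : ((PySem.List.pyRange (2*d) n d).count j : Int)
        = if d ∣ j ∧ 2*d ≤ j ∧ j < n then 1 else 0 := by
      by_cases h : d ∣ j ∧ 2*d ≤ j ∧ j < n
      · rw [if_pos h, List.count_eq_one_of_mem (pn_nodup_range _ _ _ (by omega))
          ((pn_mem_range n d j hd).2 h)]
        norm_num
      · rw [if_neg h, List.count_eq_zero_of_not_mem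
          (by rw [pn_mem_range n d j hd]; exact h)]
        norm_num
    rw [List.map_cons, List.sum_cons, hcount]
    split_ifs with h
    · ring
    · ring

-- A's helper as a sum
lemma pn_summation_eq (N : Int) :
    summation N
      = ((PySem.List.pyRange 1 N 1).map (fun i => if PySem.Int.mod N i = 0 then i else 0)).sum := by
  unfold summation
  rw [PySem.List.foldl_congr_mem _ _
    (fun total i => total + if PySem.Int.mod N i = 0 then i else 0) 0
    (by intro acc x _; by_cases h : PySem.Int.mod N x = 0 <;> simp [h])]
  rw [PySem.List.foldl_add]
  simp

-- the sieve's sum over d < n equals A's trial-division sum over d < j  (1 ≤ j < n)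
lemma pn_sums_eq (n j : Int) (hj : 1 ≤ j) (hjn : j < n) :
    ((PySem.List.pyRange 1 n 1).map (fun d => if d ∣ j ∧ 2*d ≤ j ∧ j < n then d else 0)).sum
      = ((PySem.List.pyRange 1 j 1).map (fun i => if PySem.Int.mod j i = 0 then i else 0)).sum := by
  rw [PySem.List.pyRange_one_append 1 j n hj (le_of_lt hjn), List.map_append, List.sum_append]
  have h2 : ((PySem.List.pyRange j n 1).map
      (fun d => if d ∣ j ∧ 2*d ≤ j ∧ j < n then d else 0)).sum = 0 := by
    apply List.sum_eq_zero
    intro x hx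
    simp only [List.mem_map] at hx
    obtain ⟨d, hd, rfl⟩ := hx
    rw [PySem.List.mem_pyRange_one] at hd
    rw [if_neg]
    rintro ⟨-, h2d, -⟩
    omega
  have h1 : (PySem.List.pyRange 1 j 1).map
      (fun d => if d ∣ j ∧ 2*d ≤ j ∧ j < n then d else 0)
      = (PySem.List.pyRange 1 j 1).map (fun i => if PySem.Int.mod j i = 0 then i else 0) := by
    apply List.map_congr_left
    intro d hd
    rw [PySem.List.mem_pyRange_one] at hd
    by_cases hdvd : d ∣ j
    · obtain ⟨k, hk⟩ := hdvd
      have hk2 : 2 ≤ k := by nlinarith [hd.1, hd.2, hk]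
      rw [if_pos ⟨⟨k, hk⟩, by nlinarith, hjn⟩, if_pos ((PySem.Int.mod_eq_zero_iff_dvd j d).2 ⟨k, hk⟩)]
    · rw [if_neg (fun h => hdvd h.1), if_neg]
      rw [PySem.Int.mod_eq_zero_iff_dvd]
      exact hdvd
  rw [h1, h2, add_zero]

-- the sieve cell i holds summation i  (0 ≤ n, 1 ≤ j < n)
lemma pn_sieve_eq_summation (n j : Int) (hn : 0 ≤ n) (hj : 1 ≤ j) (hjn : j < n) :
    PySem.List.pyGetD (pnSieve n) j 0 = summation j := by
  unfold pnSieve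
  rw [pn_sieve_fold n _ (by intro d hd; exact ((PySem.List.mem_pyRange_one).1 hd).1) _
    (by simp; omega) j (by omega)]
  have h0 : PySem.List.pyGetD (List.replicate n.toNat (0 : Int)) j 0 = 0 := by
    rw [PySem.List.pyGetD_eq_getElem _ _ (by omega) (by simp; omega)]
    simp
  rw [h0, zero_add, pn_sums_eq n j hj hjn, pn_summation_eq]

-- ===== VERDICT (by name: the statement is the Claim_ definition above) =====
theorem perfect_numbers_spec : Claim_equal_perfect_numbers := by
  intro N _
  unfold Spec_perfect_numbers perfect_numbers perfect_numbers_alt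
  set n := if N > 1 then N else 1 with hn
  have hrange : PySem.List.pyRange 1 N 1 = PySem.List.pyRange 1 n 1 := by
    by_cases h : N > 1
    · rw [hn, if_pos h]
    · rw [PySem.List.pyRange_one_eq_nil (by omega),
        PySem.List.pyRange_one_eq_nil (by rw [hn, if_neg h])]
  have hn1 : 1 ≤ n := by rw [hn]; split_ifs <;> omega
  rw [hrange]
  apply PySem.List.foldl_congr_mem
  intro acc i hi
  rw [PySem.List.mem_pyRange_one] at hi
  show _ = (let t := PySem.List.pyGetD (pnSieve n) i 0; _)
  simp only []
  rw [pn_sieve_eq_summation n i (by omega) hi.1 hi.2]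
  split_ifs with h1 h2 h3 <;> first | rfl | omega
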